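-- pv_equiv track=rewrite | github.com/dlgksqls/python_java_algorithm | 프로그래머스/unrated/135808. 과일 장수/과일 장수.py | solution
-- ===== SOURCE A (Python) =====
-- def solution(k, m, score):
--     answer = 0
--     count = 0
--     result = []
--     result_answer = []
--
--     score.sort(reverse = True)
--
--     for i in range(len(score)):
--         if count == m-1:
--             result.append(score[i])
--             result_answer.append(result)
--             result = []
--             count = 0
--         elif count < m-1:
--             result.append(score[i])
--             count += 1
--
--     for j in range(len(result_answer)):
--         answer += min(result_answer[j]) * m
--
--     return answer
-- ===== SOURCE B (Python) =====
-- def solution(k, m, score):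
--     # Return-value equivalence only: unlike A, this does not sort `score` in place.
--     if m < 1:
--         return 0
--     freq = {}
--     for x in score:
--         freq[x] = freq.get(x, 0) + 1
--     total = 0
--     pos = 0
--     for v in sorted(freq, reverse=True):
--         c = freq[v]
--         # in the descending order, value v occupies indices [pos, pos+c);
--         # group minima sit at indices i with (i+1) % m == 0, and there are
--         # (pos+c)//m - pos//m of those in this run
--         total += v * ((pos + c) // m - pos // m)
--         pos += c
--     return total * m
-- ===== Notes on version B (the rewrite author's own statement) =====
-- stated objective: alternative
-- what changed: Instead of sorting and scanning each m-sized group for its minimum, B builds a frequency dict and walks the distinct values in descending order, computing by floor division on run boundaries how many group-minimum positions fall inside each value's run; no groups are materialized and no min() scans occur. B does not mutate `score` (equivalence is about the return value).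
import Mathlib
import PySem

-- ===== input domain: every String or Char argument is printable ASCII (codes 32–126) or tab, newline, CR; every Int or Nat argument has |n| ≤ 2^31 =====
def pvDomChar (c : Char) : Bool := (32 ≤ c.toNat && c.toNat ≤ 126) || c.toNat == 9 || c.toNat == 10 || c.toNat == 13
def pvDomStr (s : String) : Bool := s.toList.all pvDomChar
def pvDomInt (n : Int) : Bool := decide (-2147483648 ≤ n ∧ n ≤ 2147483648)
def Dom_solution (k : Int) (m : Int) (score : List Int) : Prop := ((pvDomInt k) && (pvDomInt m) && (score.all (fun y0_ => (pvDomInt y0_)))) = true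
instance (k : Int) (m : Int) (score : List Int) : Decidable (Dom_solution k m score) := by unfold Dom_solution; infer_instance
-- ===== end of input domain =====

-- B replaces A's sort + group lists + per-group min() scans by a frequency dict walked over
-- the distinct values in descending order, counting by floor division on run boundaries how
-- many group-minimum positions each value's run covers. A sorts `score` in place, B does not:
-- the equivalence proved here is about the RETURN value only.

-- ===== PORT A =====
-- loop body of `for i in range(len(score))`, state (count, result, result_answer)
def solutionStep (m : Int) (st : Int × List Int × List (List Int)) (x : Int) :
    Int × List Int × List (List Int) :=
  let (count, result, ra) := st
  if count = m - 1 then (0, ([] : List Int), ra ++ [result ++ [x]])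
  else if count < m - 1 then (count + 1, result ++ [x], ra)
  else st

def solution (k : Int) (m : Int) (score : List Int) : Int :=
  let s := PySem.List.sorted score (fun x => x) true
  let st := s.foldl (solutionStep m) (0, ([] : List Int), ([] : List (List Int)))
  -- min(result_answer[j]) : every list in result_answer is nonempty, so getD 0 is never used
  st.2.2.foldl (fun answer l => answer + ((PySem.List.min? l (fun x => x)).getD 0) * m) 0

-- ===== PORT B =====
def solution_alt (k : Int) (m : Int) (score : List Int) : Int :=
  if m < 1 then 0
  else
    -- freq[x] = freq.get(x, 0) + 1 over score
    let freq := score.foldl (fun d x => d.insert x (d.getD x 0 + 1))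
      (PySem.Dict.empty : PySem.Dict Int Int)
    -- for v in sorted(freq, reverse=True): total += v * ((pos+c)//m - pos//m); pos += c
    let st := (PySem.List.sorted freq.keys (fun v => v) true).foldl
      (fun (tp : Int × Int) v =>
        let c := freq.getD v 0
        (tp.1 + v * (PySem.Int.floordiv (tp.2 + c) m - PySem.Int.floordiv tp.2 m), tp.2 + c))
      ((0 : Int), (0 : Int))
    st.1 * m

-- ===== PRECONDITION & SPEC =====
def Spec_solution (k : Int) (m : Int) (score : List Int) (out : Int) : Prop := out = solution_alt k m score
instance (k : Int) (m : Int) (score : List Int) (out : Int) : Decidable (Spec_solution k m score out) := by unfold Spec_solution; infer_instance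

-- ===== CLAIM (what is proved, stated in full; the proofs are below) =====
def Claim_equal_solution : Prop := ∀ (k : Int) (m : Int) (score : List Int), Dom_solution k m score → Spec_solution k m score (solution k m score)

-- ===== LEMMAS AND PROOFS =====

-- the common currency: sum of l's entries at the positions i (offset by a) with (a+i+1) % M = 0,
-- i.e. the group-minimum positions of a descending-sorted list when M ∣ a
def resSum (M : Nat) : Nat → List Int → Int
  | _, [] => 0
  | a, x :: t => (if (a + 1) % M = 0 then x else 0) + resSum M (a + 1) t

theorem resSum_append (M : Nat) (u w : List Int) :
    ∀ a, resSum M a (u ++ w) = resSum M a u + resSum M (a + u.length) w := by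
  induction u with
  | nil => intro a; simp [resSum]
  | cons x t ih =>
      intro a
      simp only [List.cons_append, resSum, ih (a + 1), List.length_cons]
      ring_nf

theorem resSum_zero (M : Nat) (l : List Int) :
    ∀ a, (∀ i, i < l.length → ¬ M ∣ (a + i + 1)) → resSum M a l = 0 := by
  induction l with
  | nil => intro a _; rfl
  | cons x t ih =>
      intro a h
      have h0 : ¬ M ∣ (a + 1) := by have := h 0 (by simp); simpa using this
      have : (a + 1) % M ≠ 0 := fun hc => h0 (Nat.dvd_of_mod_eq_zero hc)
      simp only [resSum, if_neg this, zero_add]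
      exact ih (a + 1) (fun i hi => by
        have := h (i + 1) (by simp; omega)
        intro hd; exact this (by rw [show a + (i + 1) + 1 = a + 1 + i + 1 by ring]; exact hd))

theorem resSum_short (M : Nat) (l : List Int) (a : Nat) (ha : M ∣ a) (hl : l.length < M) :
    resSum M a l = 0 := by
  apply resSum_zero
  intro i hi hd
  have h1 : M ∣ (i + 1) := by
    have := Nat.dvd_sub hd ha
    simpa [show a + i + 1 - a = i + 1 by omega] using this
  have := Nat.le_of_dvd (by omega) h1
  omega

theorem resSum_replicate (M : Nat) (hM : 1 ≤ M) (v : Int) (c : Nat) :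
    ∀ a, resSum M a (List.replicate c v) = v * ((((a + c) / M : Nat) : Int) - (((a / M : Nat)) : Int)) := by
  induction c with
  | zero => intro a; simp [resSum]
  | succ c ih =>
      intro a
      simp only [List.replicate_succ, resSum, ih (a + 1)]
      have hsd : (a + 1) / M = a / M + if M ∣ (a + 1) then 1 else 0 := Nat.succ_div
      rw [show a + (c + 1) = a + 1 + c by ring]
      by_cases hd : M ∣ (a + 1)
      · have hm0 : (a + 1) % M = 0 := Nat.mod_eq_zero_of_dvd hd
        rw [if_pos hm0, hsd, if_pos hd]
        push_cast
        ring
      · have hm0 : (a + 1) % M ≠ 0 := fun hc => hd (Nat.dvd_of_mod_eq_zero hc)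
        rw [if_neg hm0, hsd, if_neg hd]
        push_cast
        ring


theorem resSum_add_left (M : Nat) (l : List Int) :
    ∀ a, resSum M (M + a) l = resSum M a l := by
  induction l with
  | nil => intro a; rfl
  | cons x t ih =>
      intro a
      simp only [resSum, show M + a + 1 = M + (a + 1) by ring, ih (a + 1), Nat.add_mod_left]

-- in a block of M positions starting at a multiple of M, only the last position fires
theorem resSum_chunk (M : Nat) (hM : 1 ≤ M) (a : Nat) (ha : M ∣ a) (u : List Int)
    (hu : u.length = M) : resSum M a u = u.getD (M - 1) 0 := by
  have hsplit : u = u.take (M - 1) ++ u.drop (M - 1) := (List.take_append_drop _ _).symm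
  have hlt : M - 1 < u.length := by omega
  have hdrop : u.drop (M - 1) = [u[M - 1]] := by
    have h := List.drop_eq_getElem_cons hlt
    have h2 : u.drop (M - 1 + 1) = [] := by
      apply List.eq_nil_of_length_eq_zero
      simp [List.length_drop]; omega
    rw [h, h2]
  have hlen_take : (u.take (M - 1)).length = M - 1 := by simp [List.length_take]; omega
  conv_lhs => rw [hsplit]
  rw [resSum_append, hlen_take]
  have h0 : resSum M a (u.take (M - 1)) = 0 := by
    apply resSum_zero
    intro i hi hd
    have h1 : M ∣ (i + 1) := by
      have := Nat.dvd_sub hd ha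
      simpa [show a + i + 1 - a = i + 1 by omega] using this
    have := Nat.le_of_dvd (by omega) h1
    rw [hlen_take] at hi
    omega
  have hfire : (a + (M - 1) + 1) % M = 0 := by
    have : a + (M - 1) + 1 = a + M := by omega
    rw [this]
    obtain ⟨q, hq⟩ := ha
    simp [hq, show M * q + M = M * (q + 1) by ring, Nat.mul_mod_right]
  rw [h0, hdrop]
  simp only [resSum, hfire, if_pos, zero_add, add_zero]
  rw [List.getD_eq_getElem?_getD, List.getElem?_eq_getElem hlt]
  rfl

-- ---------- A side ----------

-- the answer-summing fold, from an arbitrary accumulator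
theorem sumMin_shift (m : Int) (L : List (List Int)) (a : Int) :
    L.foldl (fun answer l => answer + ((PySem.List.min? l (fun x => x)).getD 0) * m) a
      = a + L.foldl (fun answer l => answer + ((PySem.List.min? l (fun x => x)).getD 0) * m) 0 := by
  induction L generalizing a with
  | nil => simp
  | cons x t ih => simp only [List.foldl_cons]; rw [ih, ih (0 + _)]; ring

-- when m ≤ 0 the A-loop never changes its state
theorem aFold_nonpos (m : Int) (hm : m ≤ 0) (s : List Int) (ra : List (List Int)) :
    s.foldl (solutionStep m) (0, ([] : List Int), ra) = (0, [], ra) := by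
  induction s with
  | nil => rfl
  | cons x t ih =>
      have h1 : ¬ ((0 : Int) = m - 1) := by omega
      have h2 : ¬ ((0 : Int) < m - 1) := by omega
      simp only [List.foldl_cons, solutionStep, h1, h2, if_false]
      exact ih

-- filling an incomplete group: no flush happens
theorem aFold_fill (m : Int) (l : List Int) (c : Int) (r : List Int) (ra : List (List Int))
    (hc : 0 ≤ c) (hl : c + l.length < m) :
    l.foldl (solutionStep m) (c, r, ra) = (c + l.length, r ++ l, ra) := by
  induction l generalizing c r with
  | nil => simp
  | cons x t ih =>
      have h1 : ¬ (c = m - 1) := by simp at hl ⊢; omega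
      have h2 : c < m - 1 := by simp at hl; omega
      simp only [List.foldl_cons, solutionStep, h1, if_false, if_pos h2]
      rw [ih (c + 1) (r ++ [x]) (by omega) (by simp at hl ⊢; omega)]
      simp
      omega

-- one full group of m elements is flushed
theorem aFold_chunk (m : Int) (hm : 1 ≤ m) (s : List Int) (ra : List (List Int))
    (hlen : m ≤ (s.length : Int)) :
    s.foldl (solutionStep m) (0, ([] : List Int), ra)
      = (s.drop m.toNat).foldl (solutionStep m) (0, ([] : List Int), ra ++ [s.take m.toNat]) := by
  obtain ⟨n, hn⟩ : ∃ n, m.toNat = n := ⟨_, rfl⟩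
  rw [hn]
  have hn1 : 1 ≤ n := by omega
  have hns : n ≤ s.length := by omega
  have hj : n - 1 < s.length := by omega
  have hsplit : s = s.take (n - 1) ++ s.drop (n - 1) := (List.take_append_drop _ _).symm
  have hdrop : s.drop (n - 1) = s[n - 1] :: s.drop n := by
    have h := List.drop_eq_getElem_cons hj
    rw [show n - 1 + 1 = n from by omega] at h
    exact h
  have hlen_take : (s.take (n - 1)).length = n - 1 := by
    simp [List.length_take]
    omega
  have htake : s.take (n - 1) ++ [s[n - 1]] = s.take n := by
    have h := List.take_add_one (l := s) (i := n - 1)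
    rw [List.getElem?_eq_getElem hj] at h
    simp only [Option.toList_some] at h
    conv_rhs => rw [show n = (n - 1) + 1 from by omega]
    exact h.symm
  conv_lhs => rw [hsplit]
  rw [List.foldl_append,
      aFold_fill m (s.take (n - 1)) 0 [] ra le_rfl (by rw [hlen_take, ← hn]; omega)]
  rw [hdrop, List.foldl_cons]
  have hcnt : (0 : Int) + ((s.take (n - 1)).length : Int) = m - 1 := by
    rw [hlen_take]; omega
  rw [hcnt]
  simp [solutionStep, htake]

-- minimum of a nonempty descending-sorted list is its last element
theorem min_desc (l : List Int) (hp : l.Pairwise (fun a b => b ≤ a)) (j : Nat) (hj : j + 1 = l.length) :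
    (PySem.List.min? l (fun x => x)).getD 0 = l.getD j 0 := by
  have hjl : j < l.length := by omega
  have hne : l ≠ [] := by intro h; subst h; simp at hj
  cases hv : PySem.List.min? l (fun x => x) with
  | none => exact absurd ((PySem.List.min?_eq_none_iff _ _).mp hv) hne
  | some v =>
      have hvmem : v ∈ l := PySem.List.min?_mem hv
      have hvmin : ∀ y ∈ l, v ≤ y := by
        intro y hy
        simpa using PySem.List.min?_isMin hv y hy
      obtain ⟨i, hi, hvi⟩ := List.mem_iff_getElem.mp hvmem
      have hpg := List.pairwise_iff_getElem.mp hp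
      have h1 : v ≤ l[j] := hvmin _ (List.getElem_mem hjl)
      have h2 : l[j] ≤ v := by
        rcases lt_or_eq_of_le (by omega : i ≤ j) with hij | hij
        · subst hvi; exact hpg i j hi hjl hij
        · subst hij; omega
      have : v = l[j] := le_antisymm h1 h2
      simp [this, List.getD_eq_getElem?_getD, List.getElem?_eq_getElem hjl]

-- A's answer on a descending-sorted list is m times the sum at the group-minimum positions
theorem aMain (m : Int) (hm : 1 ≤ m) (s : List Int) (hp : s.Pairwise (fun a b => b ≤ a))
    (ra : List (List Int)) :
    ((s.foldl (solutionStep m) (0, ([] : List Int), ra)).2.2).foldl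
        (fun answer l => answer + ((PySem.List.min? l (fun x => x)).getD 0) * m) 0
      = ra.foldl (fun answer l => answer + ((PySem.List.min? l (fun x => x)).getD 0) * m) 0
        + resSum m.toNat 0 s * m := by
  induction hL : s.length using Nat.strong_induction_on generalizing s ra with
  | _ n ih =>
    by_cases hlt : (s.length : Int) < m
    · have hfill := aFold_fill m s 0 [] ra le_rfl (by omega)
      simp only [List.nil_append] at hfill
      rw [hfill, resSum_short m.toNat s 0 (Nat.dvd_zero _) (by omega)]
      simp
    · have hchunk := aFold_chunk m hm s ra (by omega)
      rw [hchunk,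
          ih (s.drop m.toNat).length (by simp [List.length_drop]; omega)
            (s.drop m.toNat) (hp.sublist (List.drop_sublist _ _)) _ rfl,
          List.foldl_append]
      have hsplit : s = s.take m.toNat ++ s.drop m.toNat := (List.take_append_drop _ _).symm
      have hlen_take : (s.take m.toNat).length = m.toNat := by
        simp [List.length_take]; omega
      have hres : resSum m.toNat 0 s
          = (s.take m.toNat).getD (m.toNat - 1) 0 + resSum m.toNat 0 (s.drop m.toNat) := by
        conv_lhs => rw [hsplit]
        rw [resSum_append, hlen_take,
            resSum_chunk m.toNat (by omega) 0 (Nat.dvd_zero _) _ hlen_take]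
        have := resSum_add_left m.toNat (s.drop m.toNat) 0
        simp only [Nat.add_zero, Nat.zero_add] at this ⊢
        rw [this]
      have hj1 : (m.toNat - 1) + 1 = (s.take m.toNat).length := by rw [hlen_take]; omega
      have hmin := min_desc (s.take m.toNat) (hp.sublist (List.take_sublist _ _))
        (m.toNat - 1) hj1
      simp only [List.foldl_cons, List.foldl_nil]
      rw [sumMin_shift, hmin, hres]
      ring

-- ---------- B side ----------

-- strictly descending distinct values, expanded into runs, form a descending list
theorem flat_pairwise (ks : List Int) (cnt : Int → Nat)
    (hks : ks.Pairwise (fun a b => b < a)) :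
    (ks.flatMap (fun v => List.replicate (cnt v) v)).Pairwise (fun a b => b ≤ a) := by
  induction ks with
  | nil => simp
  | cons v t ih =>
      simp only [List.flatMap_cons]
      rw [List.pairwise_append]
      refine ⟨List.pairwise_replicate.2 (by simp), ih hks.of_cons, ?_⟩
      intro x hx y hy
      have hxv : x = v := (List.eq_of_mem_replicate hx)
      obtain ⟨w, hw, hyw⟩ := List.mem_flatMap.mp hy
      have hyv : y = w := List.eq_of_mem_replicate hyw
      have := (List.pairwise_cons.mp hks).1 w hw
      omega

-- the expanded runs are a permutation of the original list
theorem flat_perm (xs ks : List Int) (hnd : ks.Nodup) (hmem : ∀ v, v ∈ ks ↔ v ∈ xs) :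
    (ks.flatMap (fun v => List.replicate (xs.count v) v)).Perm xs := by
  apply List.perm_iff_count.2
  intro y
  have hcount : ∀ (l : List Int), l.Nodup →
      (l.flatMap (fun v => List.replicate (xs.count v) v)).count y
        = if y ∈ l then xs.count y else 0 := by
    intro l hl
    induction l with
    | nil => simp
    | cons v t iht =>
        simp only [List.flatMap_cons, List.count_append, List.count_replicate,
          iht hl.of_cons]
        by_cases hyv : y = v
        · subst hyv
          have hyt : y ∉ t := (List.nodup_cons.mp hl).1
          simp [hyt]
        · have hvy : v ≠ y := fun h => hyv h.symm
          by_cases hyt : y ∈ t <;> simp [hyv, hyt, hvy]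
  rw [hcount ks hnd]
  by_cases hy : y ∈ ks
  · simp [hy]
  · have : y ∉ xs := fun hc => hy ((hmem y).2 hc)
    simp [hy, List.count_eq_zero_of_not_mem this]

-- B's fold over the runs computes resSum of the expanded list
theorem bMain (M : Nat) (hM : 1 ≤ M) (cnt : Int → Nat) (ks : List Int) :
    ∀ (t : Int) (a : Nat),
    (ks.foldl
      (fun (tp : Int × Int) v =>
        (tp.1 + v * (PySem.Int.floordiv (tp.2 + (cnt v : Int)) (M : Int)
                      - PySem.Int.floordiv tp.2 (M : Int)), tp.2 + (cnt v : Int)))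
      (t, (a : Int))).1
    = t + resSum M a (ks.flatMap (fun v => List.replicate (cnt v) v)) := by
  induction ks with
  | nil => intro t a; simp [resSum]
  | cons v ksr ih =>
      intro t a
      simp only [List.foldl_cons, List.flatMap_cons]
      have hc1 : ((a : Int) + (cnt v : Int)) = ((a + cnt v : Nat) : Int) := by push_cast; ring
      have hf1 : PySem.Int.floordiv ((a + cnt v : Nat) : Int) (M : Int)
          = (((a + cnt v) / M : Nat) : Int) := PySem.Int.floordiv_natCast _ _
      have hf2 : PySem.Int.floordiv ((a : Nat) : Int) (M : Int)
          = ((a / M : Nat) : Int) := PySem.Int.floordiv_natCast _ _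
      rw [hc1, ih _ (a + cnt v), resSum_append, hf1, hf2,
          List.length_replicate,
          resSum_replicate M hM v (cnt v) a]
      ring

-- ===== the two sorted lists =====

-- the descending-sorted list is the concatenation of the runs of each distinct value,
-- the distinct values taken in descending order
theorem sorted_eq_flat (score : List Int) :
    PySem.List.sorted score (fun x => x) true
      = (PySem.List.sorted (PySem.Set.ofList score) (fun v => v) true).flatMap
          (fun v => List.replicate (score.count v) v) := by
  set ks := PySem.List.sorted (PySem.Set.ofList score) (fun v => v) true with hks
  have hksperm : ks.Perm (PySem.Set.ofList score) := PySem.List.sorted_perm _ _ _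
  have hksnd : ks.Nodup := hksperm.nodup_iff.2 (PySem.Set.nodup_ofList score)
  have hksmem : ∀ v, v ∈ ks ↔ v ∈ score := by
    intro v
    rw [hksperm.mem_iff, PySem.Set.mem_ofList]
  have hksge : ks.Pairwise (fun a b => b ≤ a) := by
    simpa using PySem.List.sorted_pairwise_rev (PySem.Set.ofList score) (fun v => v)
  have hkslt : ks.Pairwise (fun a b => b < a) :=
    (hksge.and hksnd).imp (fun h => lt_of_le_of_ne h.1 (Ne.symm h.2))
  have hfperm : (ks.flatMap (fun v => List.replicate (score.count v) v)).Perm score :=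
    flat_perm score ks hksnd hksmem
  have hfpair := flat_pairwise ks (fun v => score.count v) hkslt
  exact List.Perm.eq_of_pairwise
    (fun a b _ _ h1 h2 => le_antisymm h2 h1)
    (by simpa using PySem.List.sorted_pairwise_rev score (fun x => x)) hfpair
    ((PySem.List.sorted_perm _ _ _).trans hfperm.symm)

-- ===== VERDICT (by name: the statement is the Claim_ definition above) =====
theorem solution_spec : Claim_equal_solution := by
  intro k m score _
  unfold Spec_solution solution solution_alt
  dsimp only
  by_cases hm : m < 1
  · rw [if_pos hm]
    rw [aFold_nonpos m (by omega)]
    simp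
  · rw [if_neg hm]
    have hM1 : 1 ≤ m.toNat := by omega
    have hmM : ((m.toNat : Nat) : Int) = m := by omega
    have hp : (PySem.List.sorted score (fun x => x) true).Pairwise (fun a b => b ≤ a) := by
      simpa using PySem.List.sorted_pairwise_rev score (fun x => x)
    -- A side
    rw [aMain m (by omega) _ hp []]
    simp only [List.foldl_nil, zero_add]
    -- B side: the dict built by the loop is Counter(score)
    rw [PySem.Dict.foldl_insert_getD_add_one_eq_counter, PySem.Dict.keys_counter]
    have hfun :
        (fun (tp : Int × Int) v =>
          (tp.1 + v * (PySem.Int.floordiv (tp.2 + (PySem.Dict.counter score).getD v 0) m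
                        - PySem.Int.floordiv tp.2 m), tp.2 + (PySem.Dict.counter score).getD v 0))
        = (fun (tp : Int × Int) v =>
          (tp.1 + v * (PySem.Int.floordiv (tp.2 + ((score.count v : Nat) : Int)) ((m.toNat : Nat) : Int)
                        - PySem.Int.floordiv tp.2 ((m.toNat : Nat) : Int)),
            tp.2 + ((score.count v : Nat) : Int))) := by
      funext tp v
      rw [PySem.Dict.getD_counter, hmM]
    rw [hfun]
    have hb := bMain m.toNat hM1 (fun v => score.count v)
      (PySem.List.sorted (PySem.Set.ofList score) (fun v => v) true) 0 0
    simp only [Nat.cast_zero] at hb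
    rw [hb, zero_add, ← sorted_eq_flat score]
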